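-- pv_equiv track=rewrite | github.com/annalauraw/advent-of-code-2025 | day_1.py | _get_dial_position
-- ===== SOURCE A (Python) =====
-- def _get_dial_position(number, zero_crossings: int = 0):
--     """
--     Get a number between 0 and 99.
--     """
--     try:
--         assert 0 <= number <= 99
--         return number, zero_crossings
--     except AssertionError:
--         zero_crossings += 1
--         if number > 99:
--             number = number - 100
--         elif number < 0:
--             number = 100 + number
--         return _get_dial_position(number, zero_crossings)
-- ===== SOURCE B (Python) =====
-- def _get_dial_position(number, zero_crossings: int = 0):
--     # Closed form: the final dial position is number mod 100, and each
--     # subtraction/addition of 100 in A is one crossing, i.e. |number // 100|.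
--     return number % 100, zero_crossings + abs(number // 100)
-- ===== Notes on version B (the rewrite author's own statement) =====
-- stated objective: faster
-- what changed: Replaced the tail recursion that adds/subtracts 100 once per step with a closed-form modulo/division formula (position = number % 100, crossings += abs(number // 100)).
-- outside the precondition, e.g. on _get_dial_position(60000, 0): A returns (0, 600), B returns (0, 600); on _get_dial_position(2000000, 0): A raises RecursionError, B returns (0, 20000)
import Mathlib
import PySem

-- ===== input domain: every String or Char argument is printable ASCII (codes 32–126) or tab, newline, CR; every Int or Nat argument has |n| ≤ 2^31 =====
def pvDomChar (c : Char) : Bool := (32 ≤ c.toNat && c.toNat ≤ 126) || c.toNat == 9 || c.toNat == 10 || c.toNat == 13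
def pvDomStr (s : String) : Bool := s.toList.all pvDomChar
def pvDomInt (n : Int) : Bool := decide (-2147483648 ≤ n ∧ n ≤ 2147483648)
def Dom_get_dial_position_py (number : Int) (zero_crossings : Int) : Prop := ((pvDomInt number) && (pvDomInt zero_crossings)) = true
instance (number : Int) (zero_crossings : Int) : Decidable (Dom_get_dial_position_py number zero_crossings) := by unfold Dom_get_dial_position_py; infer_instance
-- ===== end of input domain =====

-- B replaces A's one-step-per-100 recursion with a closed-form modulo/division formula (objective: faster).

-- ===== PORT A =====
-- literal port of A: the assert/except becomes the range test; each failing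
-- step adds 1 to zero_crossings and moves number by 100, then recurses.
def get_dial_position_py (number : Int) (zero_crossings : Int) : List Int :=
  if 0 ≤ number ∧ number ≤ 99 then
    [number, zero_crossings]
  else if number > 99 then
    get_dial_position_py (number - 100) (zero_crossings + 1)
  else
    get_dial_position_py (number + 100) (zero_crossings + 1)
termination_by (2 * number - 99).natAbs
decreasing_by all_goals omega

-- ===== PORT B =====
def get_dial_position_py_alt (number : Int) (zero_crossings : Int) : List Int :=
  [PySem.Int.mod number 100, zero_crossings + |PySem.Int.floordiv number 100|]

-- ===== PRECONDITION & SPEC =====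
-- Pre_ excludes inputs with |number| beyond 50000: A recurses once per 100 of
-- |number| and hits Python's recursion limit (RecursionError) near |number| ~ 10^5;
-- the bound is conservative because the exact limit depends on interpreter stack depth.
def Pre_get_dial_position_py (number : Int) (zero_crossings : Int) : Prop :=
  -50000 ≤ number ∧ number ≤ 50000
instance (number : Int) (zero_crossings : Int) : Decidable (Pre_get_dial_position_py number zero_crossings) := by unfold Pre_get_dial_position_py; infer_instance
def pvWitness_get_dial_position_py : Int × Int := (150, 2)
def Spec_get_dial_position_py (number : Int) (zero_crossings : Int) (out : List Int) : Prop := out = get_dial_position_py_alt number zero_crossings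
instance (number : Int) (zero_crossings : Int) (out : List Int) : Decidable (Spec_get_dial_position_py number zero_crossings out) := by unfold Spec_get_dial_position_py; infer_instance

-- ===== CLAIM (what is proved, stated in full; the proofs are below) =====
def Claim_equal_get_dial_position_py : Prop := ∀ (number : Int) (zero_crossings : Int), Dom_get_dial_position_py number zero_crossings → Pre_get_dial_position_py number zero_crossings → Spec_get_dial_position_py number zero_crossings (get_dial_position_py number zero_crossings)

-- ===== LEMMAS AND PROOFS =====

theorem get_dial_position_eq (number zero_crossings : Int) :
    get_dial_position_py number zero_crossings
      = get_dial_position_py_alt number zero_crossings := by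
  fun_induction get_dial_position_py number zero_crossings with
  | case1 n zc h =>
    simp only [get_dial_position_py_alt,
      PySem.Int.mod_eq_emod_of_pos (b := 100) (by norm_num),
      PySem.Int.floordiv_eq_ediv_of_pos (b := 100) (by norm_num),
      List.cons.injEq, and_true]
    rcases abs_cases ((n / 100 : Int)) with ⟨he, _⟩ | ⟨he, _⟩ <;> rw [he] <;>
      constructor <;> omega
  | case2 n zc h h2 ih =>
    rw [ih]
    simp only [get_dial_position_py_alt,
      PySem.Int.mod_eq_emod_of_pos (b := 100) (by norm_num),
      PySem.Int.floordiv_eq_ediv_of_pos (b := 100) (by norm_num),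
      List.cons.injEq, and_true]
    rcases abs_cases (((n - 100) / 100 : Int)) with ⟨he, _⟩ | ⟨he, _⟩ <;>
      rcases abs_cases ((n / 100 : Int)) with ⟨he2, _⟩ | ⟨he2, _⟩ <;>
      rw [he, he2] <;> constructor <;> omega
  | case3 n zc h h2 ih =>
    rw [ih]
    simp only [get_dial_position_py_alt,
      PySem.Int.mod_eq_emod_of_pos (b := 100) (by norm_num),
      PySem.Int.floordiv_eq_ediv_of_pos (b := 100) (by norm_num),
      List.cons.injEq, and_true]
    rcases abs_cases (((n + 100) / 100 : Int)) with ⟨he, _⟩ | ⟨he, _⟩ <;>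
      rcases abs_cases ((n / 100 : Int)) with ⟨he2, _⟩ | ⟨he2, _⟩ <;>
      rw [he, he2] <;> constructor <;> omega

-- ===== VERDICT (by name: the statement is the Claim_ definition above) =====
theorem get_dial_position_py_spec : Claim_equal_get_dial_position_py := by
  intro n zc _ _
  exact get_dial_position_eq n zc
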